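-- pv_equiv track=rewrite | github.com/LIU423/T2IMVI | quantification_pipeline/phase1_scoring/utils/failed_items.py | extract_target_image_map
-- ===== SOURCE A (Python) =====
-- from typing import Dict, Iterable, List, Set, Tuple
--
-- def extract_target_image_map(records: Iterable[Dict]) -> Dict[int, List[int]]:
--     """Build {idiom_id: [image_num, ...]} map for rerun."""
--     pairs: Set[Tuple[int, int]] = set()
--     for record in records:
--         idiom_id = int(record["idiom_id"])
--         image_num = int(record["image_num"])
--         pairs.add((idiom_id, image_num))
--
--     by_idiom: Dict[int, List[int]] = {}
--     for idiom_id, image_num in sorted(pairs):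
--         by_idiom.setdefault(idiom_id, []).append(image_num)
--     return by_idiom
-- ===== SOURCE B (Python) =====
-- def extract_target_image_map(records):
--     """Build {idiom_id: [image_num, ...]} map for rerun."""
--     items = [(int(record["idiom_id"]), int(record["image_num"])) for record in records]
--     return {k: sorted({img for i, img in items if i == k})
--             for k in sorted({i for i, _ in items})}
-- ===== Notes on version B (the rewrite author's own statement) =====
-- stated objective: simpler
-- what changed: Replaces the global sort of a deduplicated pair set followed by setdefault-grouping into a dict with a direct nested comprehension: iterate the sorted set of idiom ids and, for each, sort the set of its image numbers.
import Mathlib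
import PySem

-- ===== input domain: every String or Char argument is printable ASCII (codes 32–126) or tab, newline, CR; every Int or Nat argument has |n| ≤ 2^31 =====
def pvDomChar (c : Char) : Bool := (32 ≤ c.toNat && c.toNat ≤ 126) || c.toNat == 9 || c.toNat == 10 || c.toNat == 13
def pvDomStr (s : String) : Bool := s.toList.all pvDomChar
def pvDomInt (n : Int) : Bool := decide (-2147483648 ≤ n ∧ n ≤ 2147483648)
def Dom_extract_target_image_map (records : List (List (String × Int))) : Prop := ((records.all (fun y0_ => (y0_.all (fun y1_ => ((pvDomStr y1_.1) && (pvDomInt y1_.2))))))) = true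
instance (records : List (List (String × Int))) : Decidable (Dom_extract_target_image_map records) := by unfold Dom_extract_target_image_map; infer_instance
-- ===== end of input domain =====

-- B replaces A's global sort of a deduplicated pair set + setdefault-grouping dict by a nested
-- comprehension (sorted distinct idiom ids, each with the sorted set of its image numbers): simpler, same results.


-- ===== PORT A =====
-- record["idiom_id"] / record["image_num"] are ported with Dict.getD, exact under Pre_ (both keys present).
def extract_target_image_map (records : List (List (String × Int))) : List (Int × List Int) :=
  let pairs : PySem.Set (Int × Int) :=
    records.foldl (fun pairs record =>
      PySem.Set.add pairs ((PySem.Dict.mk record).getD "idiom_id" 0,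
                           (PySem.Dict.mk record).getD "image_num" 0)) PySem.Set.empty
  let by_idiom : PySem.Dict Int (List Int) :=
    (PySem.List.sorted2 pairs Prod.fst Prod.snd).foldl
      (fun d p => d.modify p.1 [] (fun l => l ++ [p.2])) PySem.Dict.empty
  by_idiom.items

-- ===== PORT B =====
def extract_target_image_map_alt (records : List (List (String × Int))) : List (Int × List Int) :=
  let items : List (Int × Int) :=
    records.map (fun record =>
      ((PySem.Dict.mk record).getD "idiom_id" 0,
       (PySem.Dict.mk record).getD "image_num" 0))
  (PySem.List.sorted (PySem.Set.ofList (items.map (fun p => p.1))) (fun k => k)).map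
    (fun k => (k, PySem.List.sorted
        (PySem.Set.ofList ((items.filter (fun p => p.1 == k)).map (fun p => p.2)))
        (fun v => v)))

-- ===== PRECONDITION & SPEC =====
-- Pre_ excludes exactly the records missing one of the two keys, on which Python A raises KeyError.
def Pre_extract_target_image_map (records : List (List (String × Int))) : Prop :=
  (records.all (fun record => (PySem.Dict.mk record).contains "idiom_id" &&
                              (PySem.Dict.mk record).contains "image_num")) = true
instance (records : List (List (String × Int))) : Decidable (Pre_extract_target_image_map records) := by
  unfold Pre_extract_target_image_map; infer_instance
def pvWitness_extract_target_image_map : (List (List (String × Int))) :=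
  [[("idiom_id", 2), ("image_num", 1)], [("idiom_id", 2), ("image_num", 0)]]

def Spec_extract_target_image_map (records : List (List (String × Int))) (out : List (Int × List Int)) : Prop := out = extract_target_image_map_alt records
instance (records : List (List (String × Int))) (out : List (Int × List Int)) : Decidable (Spec_extract_target_image_map records out) := by unfold Spec_extract_target_image_map; infer_instance

-- ===== CLAIM (what is proved, stated in full; the proofs are below) =====
def Claim_equal_extract_target_image_map : Prop := ∀ (records : List (List (String × Int))), Dom_extract_target_image_map records → Pre_extract_target_image_map records → Spec_extract_target_image_map records (extract_target_image_map records)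

-- ===== LEMMAS AND PROOFS =====

-- weak and strict lexicographic order on (idiom_id, image_num) pairs
def pvLexLe (a b : Int × Int) : Prop := a.1 < b.1 ∨ (a.1 = b.1 ∧ a.2 ≤ b.2)
def pvSLt (a b : Int × Int) : Prop := a.1 < b.1 ∨ (a.1 = b.1 ∧ a.2 < b.2)

-- inserting with sorted2's comparator preserves lexicographic order
theorem pv_insertBy_lex (x : Int × Int) (ys : List (Int × Int))
    (h : List.Pairwise pvLexLe ys) :
    List.Pairwise pvLexLe (PySem.List.insertBy
      (fun a b => decide (a.1 < b.1) || (!decide (b.1 < a.1) && decide (a.2 < b.2))) x ys) := by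
  induction ys with
  | nil => simp [PySem.List.insertBy]
  | cons y ys ih =>
    rw [List.pairwise_cons] at h
    by_cases hc : (decide (x.1 < y.1) || (!decide (y.1 < x.1) && decide (x.2 < y.2))) = true
    · rw [show PySem.List.insertBy
          (fun a b => decide (a.1 < b.1) || (!decide (b.1 < a.1) && decide (a.2 < b.2))) x (y :: ys)
          = x :: y :: ys by simp [PySem.List.insertBy, hc]]
      simp only [Bool.or_eq_true, Bool.and_eq_true, Bool.not_eq_true', decide_eq_true_eq,
        decide_eq_false_iff_not] at hc
      refine List.Pairwise.cons ?_ (List.Pairwise.cons h.1 h.2)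
      intro z hz
      rcases List.mem_cons.1 hz with rfl | hz
      · unfold pvLexLe; omega
      · have := h.1 z hz
        unfold pvLexLe at this ⊢; omega
    · rw [show PySem.List.insertBy
          (fun a b => decide (a.1 < b.1) || (!decide (b.1 < a.1) && decide (a.2 < b.2))) x (y :: ys)
          = y :: PySem.List.insertBy
              (fun a b => decide (a.1 < b.1) || (!decide (b.1 < a.1) && decide (a.2 < b.2))) x ys
        by simp [PySem.List.insertBy, hc]]
      simp only [Bool.or_eq_true, Bool.and_eq_true, Bool.not_eq_true', decide_eq_true_eq,
        decide_eq_false_iff_not, not_or, not_and] at hc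
      refine List.Pairwise.cons ?_ (ih h.2)
      intro z hz
      rcases (PySem.List.mem_insertBy _ x z ys).1 hz with rfl | hz
      · unfold pvLexLe
        rcases hc with ⟨h1, h2⟩
        by_cases hyx : y.1 < z.1
        · omega
        · right; constructor
          · omega
          · by_cases hlt : z.1 < y.1
            · omega
            · have := h2 (by omega); omega
      · exact h.1 z hz

-- sorted2 with fst/snd keys yields a lexicographically ordered list
theorem pv_sorted2_lex (xs : List (Int × Int)) :
    List.Pairwise pvLexLe (PySem.List.sorted2 xs Prod.fst Prod.snd) := by
  have haux : ∀ (l : List (Int × Int)) (acc : List (Int × Int)),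
      List.Pairwise pvLexLe acc →
      List.Pairwise pvLexLe (l.foldl (fun acc x => PySem.List.insertBy
        (fun a b => decide (a.1 < b.1) || (!decide (b.1 < a.1) && decide (a.2 < b.2))) x acc) acc) := by
    intro l
    induction l with
    | nil => intro acc h; exact h
    | cons x l ih =>
      intro acc h
      exact ih _ (pv_insertBy_lex x acc h)
  simp only [PySem.List.sorted2]
  exact haux xs [] List.Pairwise.nil

-- deduplicating a weakly increasing Int list gives a strictly increasing list
theorem pv_ofList_lt (l : List Int) (h : l.Pairwise (· ≤ ·)) :
    (PySem.Set.ofList l).Pairwise (· < ·) := by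
  induction l with
  | nil => simp [PySem.Set.ofList, PySem.Set.empty]
  | cons x l ih =>
    rw [PySem.Set.ofList_cons]
    refine List.Pairwise.cons ?_ ?_
    · intro y hy
      rcases (PySem.Set.mem_discard _ x y).1 hy with ⟨hys, hne⟩
      have hyl : y ∈ l := (PySem.Set.mem_ofList l y).1 hys
      have hle := List.rel_of_pairwise_cons h hyl
      omega
    · exact List.Pairwise.filter _ (ih (List.Pairwise.of_cons h))

theorem extract_target_image_map_eq (records : List (List (String × Int))) :
    extract_target_image_map records = extract_target_image_map_alt records := by
  unfold extract_target_image_map extract_target_image_map_alt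
  set pf : List (String × Int) → Int × Int := (fun record =>
      ((PySem.Dict.mk record).getD "idiom_id" 0,
       (PySem.Dict.mk record).getD "image_num" 0)) with hpf
  set rs : List (Int × Int) := records.map pf with hrs
  -- A's pair set is Set.ofList rs
  have hpairs : records.foldl (fun pairs record => PySem.Set.add pairs (pf record)) PySem.Set.empty
      = PySem.Set.ofList rs := by
    rw [← PySem.Set.update_map_eq_foldl_add records pf PySem.Set.empty, hrs]
    rfl
  rw [hpairs]
  set S : List (Int × Int) := PySem.List.sorted2 (PySem.Set.ofList rs) Prod.fst Prod.snd with hS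
  -- order facts about S
  have hperm : S.Perm (PySem.Set.ofList rs) := PySem.List.sorted2_perm _ _ _ _
  have hSnodup : S.Nodup := hperm.nodup_iff.2 (PySem.Set.nodup_ofList rs)
  have hlex : List.Pairwise pvLexLe S := pv_sorted2_lex _
  have hslt : List.Pairwise pvSLt S := by
    refine (hlex.and hSnodup).imp ?_
    rintro a b ⟨hab, hne⟩
    unfold pvLexLe at hab; unfold pvSLt
    rcases hab with h1 | ⟨h1, h2⟩
    · exact Or.inl h1
    · refine Or.inr ⟨h1, lt_of_le_of_ne h2 ?_⟩
      intro h3; exact hne (Prod.ext h1 h3)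
  have hmemS : ∀ p : Int × Int, p ∈ S ↔ p ∈ rs := by
    intro p; rw [hperm.mem_iff, PySem.Set.mem_ofList]
  -- A's dict: keys and values
  have hkeys : ((S.foldl (fun d p => d.modify p.1 [] (fun l => l ++ [p.2]))
      (PySem.Dict.empty : PySem.Dict Int (List Int))).keys) = PySem.Set.ofList (S.map (fun p => p.1)) := by
    rw [show (fun (d : PySem.Dict Int (List Int)) (p : Int × Int) => d.modify p.1 [] (fun l => l ++ [p.2]))
        = (fun (d : PySem.Dict Int (List Int)) (p : Int × Int) =>
            d.modify ((fun q : Int × Int => q.1) p) [] ((fun (_ : PySem.Dict Int (List Int)) (q : Int × Int) (l : List Int) => l ++ [q.2]) d p)) from rfl]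
    rw [PySem.Dict.keys_foldl_modify_key S (fun q => q.1) []
      (fun _ q l => l ++ [q.2]) PySem.Dict.empty]
    rw [show (PySem.Dict.empty : PySem.Dict Int (List Int)).keys = [] from rfl]
    exact PySem.Set.update_nil_left _
  have hgetD : ∀ k : Int, ((S.foldl (fun d p => d.modify p.1 [] (fun l => l ++ [p.2]))
      (PySem.Dict.empty : PySem.Dict Int (List Int))).getD k []) =
      (S.filter (fun p => p.1 == k)).map (fun p => p.2) := by
    intro k
    rw [PySem.Dict.getD_foldl_modify_append S PySem.Dict.empty k, PySem.Dict.getD_empty]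
    simp
  have hitems : ((S.foldl (fun d p => d.modify p.1 [] (fun l => l ++ [p.2]))
      (PySem.Dict.empty : PySem.Dict Int (List Int))).items) =
      (PySem.Set.ofList (S.map (fun p => p.1))).map
        (fun k => (k, (S.filter (fun p => p.1 == k)).map (fun p => p.2))) := by
    rw [PySem.Dict.items_eq_map_keys _ (by rw [hkeys]; exact PySem.Set.nodup_ofList _) []]
    rw [hkeys]
    exact List.map_congr_left (fun k _ => by rw [hgetD k])
  rw [hitems]
  show List.map (fun k => (k, List.map (fun p => p.2) (List.filter (fun p => p.1 == k) S)))
      (PySem.Set.ofList (List.map (fun p => p.1) S)) =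
    List.map (fun k => (k, PySem.List.sorted
        (PySem.Set.ofList (List.map (fun p => p.2) (List.filter (fun p => p.1 == k) rs))) (fun v => v)))
      (PySem.List.sorted (PySem.Set.ofList (List.map (fun p => p.1) rs)) (fun k => k))
  -- B's key list equals A's
  have hkeyeq : PySem.List.sorted (PySem.Set.ofList (rs.map (fun p => p.1))) (fun k => k)
      = PySem.Set.ofList (S.map (fun p => p.1)) := by
    apply PySem.List.sorted_eq_of_perm_of_pairwise_lt
    · rw [List.perm_ext_iff_of_nodup (PySem.Set.nodup_ofList _) (PySem.Set.nodup_ofList _)]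
      intro a
      simp only [PySem.Set.mem_ofList, List.mem_map]
      constructor
      · rintro ⟨p, hp, rfl⟩; exact ⟨p, (hmemS p).1 hp, rfl⟩
      · rintro ⟨p, hp, rfl⟩; exact ⟨p, (hmemS p).2 hp, rfl⟩
    · apply pv_ofList_lt
      rw [List.pairwise_map]
      refine hslt.imp ?_
      intro a b hab; unfold pvSLt at hab; omega
  rw [hkeyeq]
  -- per-key: B's sorted bucket equals A's run of that key
  refine List.map_congr_left (fun k _ => ?_)
  have hbucket : PySem.List.sorted
      (PySem.Set.ofList ((rs.filter (fun p => p.1 == k)).map (fun p => p.2))) (fun v => v)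
      = (S.filter (fun p => p.1 == k)).map (fun p => p.2) := by
    apply PySem.List.sorted_eq_of_perm_of_pairwise_lt
    · have hsnd : List.Pairwise (fun a b : Int => a < b)
          ((S.filter (fun p => p.1 == k)).map (fun p => p.2)) := by
        rw [List.pairwise_map]
        refine List.Pairwise.imp_of_mem ?_ (hslt.filter _)
        intro a b ha hb hab
        have ha1 : a.1 = k := by simpa using (List.of_mem_filter ha)
        have hb1 : b.1 = k := by simpa using (List.of_mem_filter hb)
        unfold pvSLt at hab; omega
      rw [List.perm_ext_iff_of_nodup (hsnd.imp (fun h => ne_of_lt h)) (PySem.Set.nodup_ofList _)]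
      intro v
      simp only [PySem.Set.mem_ofList, List.mem_map, List.mem_filter, beq_iff_eq]
      constructor
      · rintro ⟨p, ⟨hp, h1⟩, rfl⟩; exact ⟨p, ⟨(hmemS p).1 hp, h1⟩, rfl⟩
      · rintro ⟨p, ⟨hp, h1⟩, rfl⟩; exact ⟨p, ⟨(hmemS p).2 hp, h1⟩, rfl⟩
    · rw [List.pairwise_map]
      refine List.Pairwise.imp_of_mem ?_ (hslt.filter _)
      intro a b ha hb hab
      have ha1 : a.1 = k := by simpa using (List.of_mem_filter ha)
      have hb1 : b.1 = k := by simpa using (List.of_mem_filter hb)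
      unfold pvSLt at hab; omega
  rw [hbucket]

-- ===== VERDICT (by name: the statement is the Claim_ definition above) =====
theorem extract_target_image_map_spec : Claim_equal_extract_target_image_map := by
  intro records _ _
  unfold Spec_extract_target_image_map
  exact extract_target_image_map_eq records
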